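-- pv_equiv track=rewrite | github.com/iYoQ/codewars | 6kyu/Dashatize_it.py | dashatize
-- ===== SOURCE A (Python) =====
-- def dashatize(n):
--     if isinstance(n, int):
--         n = abs(n)
--         n = list(map(int, str(n)))
--         if len(n) == 1:
--             return str(n[0])
--         for index, i in enumerate(n):
--             if i % 2:
--                 if index and index != len(n)-1:
--                     n[index] = "-" + str(i) + "-"
--                 elif not index:
--                     n[index] = str(i) + "-"
--                 elif index == len(n)-1:
--                     n[index] = "-" + str(i)
--             else:
--                 n[index] = str(i)
--         s = "".join(n)
--         s = s.replace("--", "-")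
--         return s
--     return "None"
-- ===== SOURCE B (Python) =====
-- def dashatize(n):
--     if not isinstance(n, int):
--         return "None"
--     s = str(abs(n))
--     out = [s[0]]
--     for prev, cur in zip(s, s[1:]):
--         if int(prev) % 2 or int(cur) % 2:
--             out.append("-")
--         out.append(cur)
--     return "".join(out)
-- ===== Notes on version B (the rewrite author's own statement) =====
-- stated objective: simpler
-- what changed: B makes one pass over adjacent digit pairs of str(abs(n)), inserting a dash between two digits iff either is odd, instead of A's per-index case analysis that wraps each odd digit in dashes and then collapses '--' with a second replace pass.
import Mathlib
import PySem

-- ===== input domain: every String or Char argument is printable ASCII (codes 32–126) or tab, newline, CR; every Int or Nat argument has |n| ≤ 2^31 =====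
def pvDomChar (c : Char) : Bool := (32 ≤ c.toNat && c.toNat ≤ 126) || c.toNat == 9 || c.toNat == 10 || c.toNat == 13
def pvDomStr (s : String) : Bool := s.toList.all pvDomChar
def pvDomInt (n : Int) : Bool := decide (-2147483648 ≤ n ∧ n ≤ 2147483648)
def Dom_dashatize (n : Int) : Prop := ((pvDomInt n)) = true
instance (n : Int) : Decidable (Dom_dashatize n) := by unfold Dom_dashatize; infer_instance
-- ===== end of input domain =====

-- B builds the result in one pass from the dashes between adjacent digit pairs (a dash iff either
-- neighbour is odd) instead of wrapping each odd digit by index and collapsing "--" afterwards;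
-- objective: simpler (no index case analysis, no second replace pass).

-- ===== PORT A =====
-- int(ch) on a character of str(abs(n)) is ch - '0': exact, those characters are '0'..'9'
def dashatize (n : Int) : String :=
  let m : Int := |n|
  let ds : List Int := (PySem.Int.toStr m).toList.map (fun c => ((c.toNat : Int) - 48))
  if ds.length = 1 then
    PySem.Int.toStr (ds.headD 0)  -- n[0]: the list has exactly one element here
  else
    let pieces : List String := (PySem.List.enumerate ds).map (fun (p : Int × Int) =>
      if p.2 % 2 ≠ 0 then
        if p.1 ≠ 0 ∧ p.1 ≠ (ds.length : Int) - 1 then "-" ++ PySem.Int.toStr p.2 ++ "-"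
        else if p.1 = 0 then PySem.Int.toStr p.2 ++ "-"
        else "-" ++ PySem.Int.toStr p.2   -- the remaining case is exactly index == len(n)-1
      else PySem.Int.toStr p.2)
    PySem.Str.replace (PySem.Str.join "" pieces) "--" "-"

-- ===== PORT B =====
-- int(ch) % 2 truthiness on a digit char ch is (ch - '0') % 2 = 1
def dashatize_alt (n : Int) : String :=
  let s : List Char := (PySem.Int.toStr |n|).toList
  -- s[0]: s is nonempty, str(abs(n)) always has at least one character
  let out : List Char := (s.zip (s.drop 1)).foldl
    (fun acc p =>
      (if (p.1.toNat - 48) % 2 = 1 ∨ (p.2.toNat - 48) % 2 = 1 then acc ++ ['-'] else acc) ++ [p.2])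
    [s.headD ' ']
  String.ofList out

-- ===== PRECONDITION & SPEC =====
def Spec_dashatize (n : Int) (out : String) : Prop := out = dashatize_alt n
instance (n : Int) (out : String) : Decidable (Spec_dashatize n out) := by unfold Spec_dashatize; infer_instance

-- ===== CLAIM (what is proved, stated in full; the proofs are below) =====
def Claim_equal_dashatize : Prop := ∀ (n : Int), Dom_dashatize n → Spec_dashatize n (dashatize n)

-- ===== LEMMAS AND PROOFS =====

-- the ten decimal digit characters
def pvDigits : List Char := ['0','1','2','3','4','5','6','7','8','9']

-- oddness of a digit character (B's test, at char level)
def pvOdd (c : Char) : Bool := (c.toNat - 48) % 2 = 1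

-- Python's replace(s, "--", "-"), as a clean structural recursion
def pvRep : List Char → List Char
  | [] => []
  | [c] => [c]
  | c :: c' :: t => if c = '-' ∧ c' = '-' then '-' :: pvRep t else c :: pvRep (c' :: t)

-- the dashed tail B produces after the first digit, threaded by the previous digit's parity
def pvGaps : Bool → List Char → List Char
  | _, [] => []
  | podd, c :: t => (if podd || pvOdd c then ['-'] else []) ++ c :: pvGaps (pvOdd c) t

-- the concatenation of A's pieces for indices 1 .. len-1 (last one special)
def pvTailP : List Char → List Char
  | [] => []
  | [c] => (if pvOdd c then ['-'] else []) ++ [c]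
  | c :: c' :: t => (if pvOdd c then ['-', c, '-'] else [c]) ++ pvTailP (c' :: t)

theorem pvTailP_singleton (c : Char) :
    pvTailP [c] = (if pvOdd c then ['-'] else []) ++ [c] := rfl

theorem pvTailP_cons_cons (c c' : Char) (t : List Char) :
    pvTailP (c :: c' :: t) = (if pvOdd c then ['-', c, '-'] else [c]) ++ pvTailP (c' :: t) := rfl

theorem pvDigits_toDigitsCore : ∀ (f m : ℕ) (acc : List Char), (∀ c ∈ acc, c ∈ pvDigits) →
    ∀ c ∈ Nat.toDigitsCore 10 f m acc, c ∈ pvDigits := by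
  intro f
  induction f with
  | zero => intro m acc hacc c hc; simp only [Nat.toDigitsCore] at hc; exact hacc c hc
  | succ f ih =>
    intro m acc hacc c hc
    have hd : (m % 10).digitChar ∈ pvDigits := by
      have h10 : m % 10 < 10 := Nat.mod_lt _ (by norm_num)
      interval_cases h : (m % 10) <;> decide
    simp only [Nat.toDigitsCore] at hc
    split at hc
    · rcases List.mem_cons.mp hc with hc | hc
      · simpa [hc] using hd
      · exact hacc c hc
    · refine ih _ _ ?_ c hc
      intro x hx
      rcases List.mem_cons.mp hx with hx | hx
      · simpa [hx] using hd
      · exact hacc x hx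

theorem pvDigits_toDigits (m : ℕ) : ∀ c ∈ Nat.toDigits 10 m, c ∈ pvDigits :=
  pvDigits_toDigitsCore _ _ _ (by simp)

theorem pvToDigitsCore_ne_nil : ∀ (f m : ℕ) (acc : List Char), acc ≠ [] →
    Nat.toDigitsCore 10 f m acc ≠ [] := by
  intro f
  induction f with
  | zero => intro m acc h; simpa [Nat.toDigitsCore] using h
  | succ f ih =>
    intro m acc h
    simp only [Nat.toDigitsCore]
    split
    · simp
    · exact ih _ _ (by simp)

theorem pvToDigits_ne_nil (m : ℕ) : Nat.toDigits 10 m ≠ [] := by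
  unfold Nat.toDigits
  simp only [Nat.toDigitsCore]
  split
  · simp
  · exact pvToDigitsCore_ne_nil _ _ _ (by simp)

-- the digit characters of str(|n|)
theorem pvAbsChars (n : Int) :
    (PySem.Int.toStr |n|).toList ≠ [] ∧ (∀ c ∈ (PySem.Int.toStr |n|).toList, c ∈ pvDigits) := by
  have h1 : (PySem.Int.toStr |n|).toList = Nat.toDigits 10 n.natAbs := by
    rw [PySem.Int.toList_toStr]
    have h0 : ¬ (|n| < 0) := not_lt.mpr (abs_nonneg n)
    simp only [PySem.Int.toChars, if_neg h0]
    congr 1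
    rw [Int.abs_eq_natAbs, Int.toNat_natCast]
  exact ⟨by rw [h1]; exact pvToDigits_ne_nil _, by rw [h1]; exact pvDigits_toDigits _⟩

-- int→str roundtrip on a digit character
theorem pvRound (c : Char) (hc : c ∈ pvDigits) :
    PySem.Int.toChars ((c.toNat : Int) - 48) = [c] := by
  fin_cases hc <;> decide

-- A's Int parity test agrees with pvOdd on digit characters
theorem pvParity (c : Char) (hc : c ∈ pvDigits) :
    (((c.toNat : Int) - 48) % 2 ≠ 0) ↔ pvOdd c = true := by
  fin_cases hc <;> decide

theorem pvDigit_ne_dash (c : Char) (hc : c ∈ pvDigits) : c ≠ '-' := by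
  fin_cases hc <;> decide

-- pvRep steps over any non-dash head
theorem pvRep_cons (c : Char) (t : List Char) (hc : c ≠ '-') :
    pvRep (c :: t) = c :: pvRep t := by
  match t with
  | [] => rfl
  | c' :: t' => exact if_neg (by intro h; exact hc h.1)

-- Chars.replace.go with enough fuel is pvRep
theorem pvGo (fuel : ℕ) : ∀ (l acc : List Char), l.length ≤ fuel →
    PySem.Chars.replace.go ['-', '-'] ['-'] fuel l acc = acc.reverse ++ pvRep l := by
  induction fuel with
  | zero =>
    intro l acc h
    have : l = [] := by cases l <;> simp_all
    subst this
    simp [PySem.Chars.replace.go, pvRep]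
  | succ fuel ih =>
    intro l acc h
    match l with
    | [] => simp [PySem.Chars.replace.go, pvRep]
    | c :: t =>
      simp only [PySem.Chars.replace.go]
      split
      · rename_i hpre
        have hp : ['-', '-'] <+: c :: t := List.isPrefixOf_iff_prefix.mp hpre
        rcases hp with ⟨t', ht'⟩
        obtain ⟨rfl, rfl⟩ : c = '-' ∧ t = '-' :: t' := by
          injection ht' with h1 h2
          exact ⟨h1.symm, h2.symm⟩
        rw [ih _ _ (by simp at h ⊢; omega)]
        simp [pvRep]
      · rename_i hpre
        cases t with
        | nil =>
          rw [ih _ _ (by simp)]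
          simp [pvRep]
        | cons c' t' =>
          rw [ih _ _ (by simp at h ⊢; omega)]
          have : ¬ (c = '-' ∧ c' = '-') := by
            intro ⟨h1, h2⟩
            subst h1; subst h2
            simp [List.isPrefixOf] at hpre
          simp only [pvRep, if_neg this]
          simp

-- the top-level replace with enough fuel
theorem pvReplace (l : List Char) :
    PySem.Chars.replace l ['-', '-'] ['-'] = pvRep l := by
  have he : (['-', '-'] : List Char).isEmpty = false := rfl
  simp only [PySem.Chars.replace, he, Bool.false_eq_true, if_false]
  simpa using pvGo l.length l []

-- B's fold is pvGaps
theorem pvFold (rest : List Char) : ∀ (p : Char) (acc : List Char),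
    ((p :: rest).zip rest).foldl
      (fun acc q =>
        (if (q.1.toNat - 48) % 2 = 1 ∨ (q.2.toNat - 48) % 2 = 1 then acc ++ ['-'] else acc) ++ [q.2])
      acc = acc ++ pvGaps (pvOdd p) rest := by
  induction rest with
  | nil => intro p acc; simp [pvGaps]
  | cons c t ih =>
    intro p acc
    simp only [List.zip_cons_cons, List.foldl_cons]
    rw [ih c]
    have hcond : ((p.toNat - 48) % 2 = 1 ∨ (c.toNat - 48) % 2 = 1) ↔ (pvOdd p || pvOdd c) = true := by
      simp [pvOdd]
    simp only [pvGaps]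
    by_cases hb : (pvOdd p || pvOdd c) = true
    · rw [if_pos (hcond.mpr hb), if_pos hb]; simp
    · rw [if_neg (fun hh => hb (hcond.mp hh)), if_neg hb]; simp

-- A's joined pieces for the indices ≥ 1, with the running index k and total length L
theorem pvJoinTail (t : List Char) : ∀ (k L : Int), t ≠ [] → (∀ c ∈ t, c ∈ pvDigits) →
    1 ≤ k → k + t.length = L →
    PySem.Chars.join []
      ((PySem.List.enumerate (t.map (fun c => ((c.toNat : Int) - 48))) k).map (fun (p : Int × Int) =>
        (if p.2 % 2 ≠ 0 then
          if p.1 ≠ 0 ∧ p.1 ≠ L - 1 then "-" ++ PySem.Int.toStr p.2 ++ "-"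
          else if p.1 = 0 then PySem.Int.toStr p.2 ++ "-"
          else "-" ++ PySem.Int.toStr p.2
        else PySem.Int.toStr p.2).toList)) = pvTailP t := by
  induction t with
  | nil => intro k L h; exact absurd rfl h
  | cons c t ih =>
    intro k L _ hdig hk hkL
    have hc : c ∈ pvDigits := hdig c (by simp)
    have hstr : (PySem.Int.toStr ((c.toNat : Int) - 48)).toList = [c] := by
      rw [PySem.Int.toList_toStr]; exact pvRound c hc
    cases t with
    | nil =>
      -- last element: k = L - 1 and k != 0
      have hk0 : ¬ (k = 0) := by omega
      have hkL1 : k = L - 1 := by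
        simp only [List.length_cons, List.length_nil] at hkL; push_cast at hkL; omega
      have hnotmid : ¬ (k ≠ 0 ∧ k ≠ L - 1) := fun h => h.2 hkL1
      have henum1 : PySem.List.enumerate ([c].map (fun c => ((c.toNat : Int) - 48))) k
          = [(k, ((c.toNat : Int) - 48))] := by
        simp [PySem.List.enumerate]
      rw [henum1, List.map_cons, List.map_nil, PySem.Chars.join_singleton]
      by_cases ho : ((c.toNat : Int) - 48) % 2 ≠ 0
      · have hodd : pvOdd c = true := (pvParity c hc).mp ho
        have htp : pvTailP [c] = ['-', c] := by rw [pvTailP_singleton, hodd]; rfl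
        rw [if_pos ho, if_neg hnotmid, if_neg hk0, htp]
        rw [String.toList_append, hstr]
        rfl
      · have hodd : pvOdd c = false := by
          rcases Bool.eq_false_or_eq_true (pvOdd c) with h | h
          · exact absurd ((pvParity c hc).mpr h) ho
          · exact h
        have htp : pvTailP [c] = [c] := by rw [pvTailP_singleton, hodd]; rfl
        rw [if_neg ho, htp, hstr]
    | cons c' t' =>
      -- middle element: 1 ≤ k < L - 1
      have hmid : k ≠ 0 ∧ k ≠ L - 1 := by
        constructor
        · omega
        · simp only [List.length_cons] at hkL; push_cast at hkL; omega
      have henum : PySem.List.enumerate ((c :: c' :: t').map (fun c => ((c.toNat : Int) - 48))) k =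
          (k, ((c.toNat : Int) - 48)) ::
            PySem.List.enumerate ((c' :: t').map (fun c => ((c.toNat : Int) - 48))) (k + 1) := by
        simp [PySem.List.enumerate]
      rw [henum, List.map_cons]
      have hrec := ih (k + 1) L (by simp) (fun x hx => hdig x (List.mem_cons_of_mem _ hx))
        (by omega) (by simp only [List.length_cons] at hkL ⊢; push_cast at hkL ⊢; omega)
      have hXne : (PySem.List.enumerate ((c' :: t').map (fun c => ((c.toNat : Int) - 48)))
          (k + 1)).map (fun (p : Int × Int) =>
            (if p.2 % 2 ≠ 0 then
              if p.1 ≠ 0 ∧ p.1 ≠ L - 1 then "-" ++ PySem.Int.toStr p.2 ++ "-"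
              else if p.1 = 0 then PySem.Int.toStr p.2 ++ "-"
              else "-" ++ PySem.Int.toStr p.2
            else PySem.Int.toStr p.2).toList) ≠ [] := by
        simp
      obtain ⟨q, rest, hX⟩ := List.exists_cons_of_ne_nil hXne
      rw [hX, PySem.Chars.join_cons_cons, ← hX, hrec]
      by_cases ho : ((c.toNat : Int) - 48) % 2 ≠ 0
      · have hodd : pvOdd c = true := (pvParity c hc).mp ho
        have htp : pvTailP (c :: c' :: t') = '-' :: c :: '-' :: pvTailP (c' :: t') := by
          rw [pvTailP_cons_cons, hodd]; rfl
        rw [if_pos ho, if_pos hmid, htp]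
        rw [String.toList_append, String.toList_append, hstr]
        rfl
      · have hodd : pvOdd c = false := by
          rcases Bool.eq_false_or_eq_true (pvOdd c) with h | h
          · exact absurd ((pvParity c hc).mpr h) ho
          · exact h
        have htp : pvTailP (c :: c' :: t') = c :: pvTailP (c' :: t') := by
          rw [pvTailP_cons_cons, hodd]; rfl
        rw [if_neg ho, htp, hstr]
        rfl

-- pvRep specializations
theorem pvRep_dash_dash (t : List Char) : pvRep ('-' :: '-' :: t) = '-' :: pvRep t :=
  if_pos ⟨rfl, rfl⟩

theorem pvRep_dash_cons (x : Char) (t : List Char) (hx : x ≠ '-') :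
    pvRep ('-' :: x :: t) = '-' :: pvRep (x :: t) :=
  if_neg (fun h => hx h.2)

-- pvRep on a one-element list
theorem pvRep_singleton (c : Char) : pvRep [c] = [c] := rfl

-- collapsing the double dashes of A's tail pieces yields exactly B's gaps
theorem pvRepGaps : ∀ (rest : List Char), rest ≠ [] → (∀ c ∈ rest, c ∈ pvDigits) →
    ∀ podd : Bool, pvRep ((if podd then ['-'] else []) ++ pvTailP rest) = pvGaps podd rest := by
  intro rest
  induction rest with
  | nil => intro h; exact absurd rfl h
  | cons c t ih =>
    intro _ hdig podd
    have hc : c ∈ pvDigits := hdig c (by simp)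
    have hcd : c ≠ '-' := pvDigit_ne_dash c hc
    cases t with
    | nil =>
      cases podd <;> cases hodd : pvOdd c
      · have htp : pvTailP [c] = [c] := by rw [pvTailP_singleton, hodd]; rfl
        rw [htp]
        show pvRep [c] = pvGaps false [c]
        rw [pvRep_singleton]
        simp [pvGaps, hodd]
      · have htp : pvTailP [c] = ['-', c] := by rw [pvTailP_singleton, hodd]; rfl
        rw [htp]
        show pvRep ['-', c] = pvGaps false [c]
        rw [pvRep_dash_cons c [] hcd, pvRep_singleton]
        simp [pvGaps, hodd]
      · have htp : pvTailP [c] = [c] := by rw [pvTailP_singleton, hodd]; rfl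
        rw [htp]
        show pvRep ['-', c] = pvGaps true [c]
        rw [pvRep_dash_cons c [] hcd, pvRep_singleton]
        simp [pvGaps, hodd]
      · have htp : pvTailP [c] = ['-', c] := by rw [pvTailP_singleton, hodd]; rfl
        rw [htp]
        show pvRep ['-', '-', c] = pvGaps true [c]
        rw [pvRep_dash_dash, pvRep_singleton]
        simp [pvGaps, hodd]
    | cons c' t' =>
      have hrec := ih (by simp) (fun x hx => hdig x (List.mem_cons_of_mem _ hx))
      have hfalse : pvRep (pvTailP (c' :: t')) = pvGaps false (c' :: t') := hrec false
      have htrue : pvRep ('-' :: pvTailP (c' :: t')) = pvGaps true (c' :: t') := hrec true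
      cases podd <;> cases hodd : pvOdd c
      · have htp : pvTailP (c :: c' :: t') = c :: pvTailP (c' :: t') := by
          rw [pvTailP_cons_cons, hodd]; rfl
        rw [htp]
        show pvRep (c :: pvTailP (c' :: t')) = pvGaps false (c :: c' :: t')
        rw [pvRep_cons c _ hcd, hfalse]
        simp [pvGaps, hodd]
      · have htp : pvTailP (c :: c' :: t') = '-' :: c :: '-' :: pvTailP (c' :: t') := by
          rw [pvTailP_cons_cons, hodd]; rfl
        rw [htp]
        show pvRep ('-' :: c :: '-' :: pvTailP (c' :: t')) = pvGaps false (c :: c' :: t')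
        rw [pvRep_dash_cons c _ hcd, pvRep_cons c _ hcd, htrue]
        simp [pvGaps, hodd]
      · have htp : pvTailP (c :: c' :: t') = c :: pvTailP (c' :: t') := by
          rw [pvTailP_cons_cons, hodd]; rfl
        rw [htp]
        show pvRep ('-' :: c :: pvTailP (c' :: t')) = pvGaps true (c :: c' :: t')
        rw [pvRep_dash_cons c _ hcd, pvRep_cons c _ hcd, hfalse]
        simp [pvGaps, hodd]
      · have htp : pvTailP (c :: c' :: t') = '-' :: c :: '-' :: pvTailP (c' :: t') := by
          rw [pvTailP_cons_cons, hodd]; rfl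
        rw [htp]
        show pvRep ('-' :: '-' :: c :: '-' :: pvTailP (c' :: t')) = pvGaps true (c :: c' :: t')
        rw [pvRep_dash_dash, pvRep_cons c _ hcd, htrue]
        simp [pvGaps, hodd]

-- one step of enumerate
theorem pvEnum_cons {α : Type} (x : α) (l : List α) (k : Int) :
    PySem.List.enumerate (x :: l) k = (k, x) :: PySem.List.enumerate l (k + 1) := by
  simp [PySem.List.enumerate]

-- the two ports agree on any nonempty list of digit characters
theorem pvMain : ∀ (cs : List Char), cs ≠ [] → (∀ c ∈ cs, c ∈ pvDigits) →
    (if (cs.map (fun c => ((c.toNat : Int) - 48))).length = 1 then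
      PySem.Int.toStr ((cs.map (fun c => ((c.toNat : Int) - 48))).headD 0)
    else
      PySem.Str.replace (PySem.Str.join ""
        ((PySem.List.enumerate (cs.map (fun c => ((c.toNat : Int) - 48)))).map (fun (p : Int × Int) =>
          if p.2 % 2 ≠ 0 then
            if p.1 ≠ 0 ∧ p.1 ≠ ((cs.map (fun c => ((c.toNat : Int) - 48))).length : Int) - 1 then
              "-" ++ PySem.Int.toStr p.2 ++ "-"
            else if p.1 = 0 then PySem.Int.toStr p.2 ++ "-"
            else "-" ++ PySem.Int.toStr p.2
          else PySem.Int.toStr p.2))) "--" "-")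
    = String.ofList ((cs.zip (cs.drop 1)).foldl
        (fun acc p =>
          (if (p.1.toNat - 48) % 2 = 1 ∨ (p.2.toNat - 48) % 2 = 1 then acc ++ ['-'] else acc) ++ [p.2])
        [cs.headD ' ']) := by
  intro cs hne hdig
  cases cs with
  | nil => exact absurd rfl hne
  | cons c0 rest =>
    cases rest with
    | nil =>
      have hc : c0 ∈ pvDigits := hdig c0 (by simp)
      rw [if_pos (by simp)]
      show String.ofList (PySem.Int.toChars ((c0.toNat : Int) - 48)) = _
      rw [pvRound c0 hc]
      simp
    | cons c1 t =>
      have hd0 : c0 ∈ pvDigits := hdig c0 (by simp)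
      have hdr : ∀ c ∈ c1 :: t, c ∈ pvDigits := fun x hx => hdig x (List.mem_cons_of_mem _ hx)
      have hstr0 : (PySem.Int.toStr ((c0.toNat : Int) - 48)).toList = [c0] := by
        rw [PySem.Int.toList_toStr]; exact pvRound c0 hd0
      rw [if_neg (by simp)]
      refine String.toList_inj.mp ?_
      rw [PySem.Str.toList_replace,
        show ("--" : String).toList = ['-', '-'] from rfl,
        show ("-" : String).toList = ['-'] from rfl,
        pvReplace, PySem.Str.toList_join,
        show ("" : String).toList = ([] : List Char) from rfl,
        List.map_map]
      simp only [Function.comp_def]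
      rw [List.map_cons, pvEnum_cons, List.map_cons,
        show ((0 : Int) + 1) = 1 from rfl]
      have hL : (1 : Int) + ((c1 :: t).length : Int) =
          ((((c0.toNat : Int) - 48) :: (c1 :: t).map (fun c => ((c.toNat : Int) - 48))).length : Int) := by
        simp
        omega
      have hjt := pvJoinTail (c1 :: t) 1
        ((((c0.toNat : Int) - 48) :: (c1 :: t).map (fun c => ((c.toNat : Int) - 48))).length : Int)
        (by simp) hdr (by norm_num) hL
      have hXne : ((PySem.List.enumerate ((c1 :: t).map (fun c => ((c.toNat : Int) - 48))) 1).map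
          (fun (p : Int × Int) =>
            (if p.2 % 2 ≠ 0 then
              if p.1 ≠ 0 ∧ p.1 ≠ ((((c0.toNat : Int) - 48) :: (c1 :: t).map (fun c => ((c.toNat : Int) - 48))).length : Int) - 1 then
                "-" ++ PySem.Int.toStr p.2 ++ "-"
              else if p.1 = 0 then PySem.Int.toStr p.2 ++ "-"
              else "-" ++ PySem.Int.toStr p.2
            else PySem.Int.toStr p.2).toList)) ≠ [] := by
        simp
      obtain ⟨q, restX, hX⟩ := List.exists_cons_of_ne_nil hXne
      rw [hX, PySem.Chars.join_cons_cons, ← hX, hjt]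
      -- right-hand side
      rw [show ((c0 :: c1 :: t).drop 1) = c1 :: t from rfl]
      rw [show (String.ofList ((((c0 :: c1 :: t).zip (c1 :: t))).foldl
          (fun acc p =>
            (if (p.1.toNat - 48) % 2 = 1 ∨ (p.2.toNat - 48) % 2 = 1 then acc ++ ['-'] else acc) ++ [p.2])
          [(c0 :: c1 :: t).headD ' '])).toList =
          (((c0 :: c1 :: t).zip (c1 :: t))).foldl
          (fun acc p =>
            (if (p.1.toNat - 48) % 2 = 1 ∨ (p.2.toNat - 48) % 2 = 1 then acc ++ ['-'] else acc) ++ [p.2])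
          [c0] from by simp]
      rw [pvFold (c1 :: t) c0 [c0]]
      -- the index-0 piece
      by_cases ho : ((c0.toNat : Int) - 48) % 2 ≠ 0
      · have hodd : pvOdd c0 = true := (pvParity c0 hd0).mp ho
        rw [if_pos ho, if_neg (by simp), if_pos rfl]
        rw [String.toList_append, hstr0]
        have hg : pvRep ('-' :: pvTailP (c1 :: t)) = pvGaps true (c1 :: t) :=
          pvRepGaps (c1 :: t) (by simp) hdr true
        show pvRep (c0 :: '-' :: pvTailP (c1 :: t)) = [c0] ++ pvGaps (pvOdd c0) (c1 :: t)
        rw [pvRep_cons c0 _ (pvDigit_ne_dash c0 hd0), hg, hodd]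
        rfl
      · have hodd : pvOdd c0 = false := by
          rcases Bool.eq_false_or_eq_true (pvOdd c0) with h | h
          · exact absurd ((pvParity c0 hd0).mpr h) ho
          · exact h
        rw [if_neg ho, hstr0]
        have hg : pvRep (pvTailP (c1 :: t)) = pvGaps false (c1 :: t) :=
          pvRepGaps (c1 :: t) (by simp) hdr false
        show pvRep (c0 :: pvTailP (c1 :: t)) = [c0] ++ pvGaps (pvOdd c0) (c1 :: t)
        rw [pvRep_cons c0 _ (pvDigit_ne_dash c0 hd0), hg, hodd]
        rfl

-- ===== VERDICT (by name: the statement is the Claim_ definition above) =====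
theorem dashatize_spec : Claim_equal_dashatize := by
  intro n _
  unfold Spec_dashatize dashatize dashatize_alt
  obtain ⟨hne, hdig⟩ := pvAbsChars n
  exact pvMain _ hne hdig
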